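-- pv_equiv track=rewrite | github.com/LucaMica02/AlgorithmsCourseSapienza | Dynamic_Programming/Dynamic_Programming_Exercises.py | findSubset2
-- ===== SOURCE A (Python) =====
-- def findSubset2(array, C):
--     memo = [[-1]*(C+1) for i in range(len(array) + 1)]
--
--     def helper(array, i, C, memo):
--         if memo[i][C] == -1:
--             if i == 0 or C == 0:
--                 memo[i][C] = 0
--             else:
--                 leave, take = helper(array, i-1, C, memo), 0
--                 if array[i-1] <= C:
--                     take = helper(array, i-1, C - array[i-1], memo) + array[i-1]
--                 memo[i][C] = max(leave, take)
--         return memo[i][C]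
--
--     return helper(array, len(array), C, memo)
-- ===== SOURCE B (Python) =====
-- def findSubset2(array, C):
--     # Bottom-up 1-D knapsack table instead of the recursive memoized helper.
--     dp = [0] * (C + 1)
--     for x in array:
--         if 0 <= x <= C:
--             for c in range(C, x - 1, -1):
--                 dp[c] = max(dp[c], dp[c - x] + x)
--     return dp[C]
-- ===== Notes on version B (the rewrite author's own statement) =====
-- stated objective: alternative
-- what changed: Replaced the recursive memoized helper over a 2D sentinel table by an iterative bottom-up 1-D knapsack array updated in place with a descending inner loop, skipping items that can never be taken.
import Mathlib
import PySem

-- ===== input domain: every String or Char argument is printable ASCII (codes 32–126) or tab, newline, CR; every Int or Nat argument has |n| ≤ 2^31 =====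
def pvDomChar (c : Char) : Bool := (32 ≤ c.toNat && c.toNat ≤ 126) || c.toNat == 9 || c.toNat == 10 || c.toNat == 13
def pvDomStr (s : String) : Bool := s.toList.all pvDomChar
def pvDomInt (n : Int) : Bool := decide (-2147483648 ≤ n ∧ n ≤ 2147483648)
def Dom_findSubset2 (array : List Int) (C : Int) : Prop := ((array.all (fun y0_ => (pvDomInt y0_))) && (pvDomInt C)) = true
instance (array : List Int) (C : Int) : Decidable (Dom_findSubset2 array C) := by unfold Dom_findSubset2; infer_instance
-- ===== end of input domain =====

-- B replaces A's recursive memoized helper by an iterative bottom-up 1-D knapsack array (alternative decomposition, same O(n*C) cost).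

-- ===== PORT A =====
-- memo[i][C] is ported as a total function table updated by pointwise override;
-- lookups/stores out of the Python table's extent (which raise IndexError in Python) are excluded by Pre_.
def pvUpd (m : Nat → Int → Int) (i : Nat) (c v : Int) : Nat → Int → Int :=
  fun i' c' => if i' = i ∧ c' = c then v else m i' c'

def pvHelper (array : List Int) : Nat → Int → (Nat → Int → Int) → ((Nat → Int → Int) × Int)
  | i, C, memo =>
    if memo i C ≠ -1 then (memo, memo i C)
    else
      match i with
      | 0 =>
        let m := pvUpd memo 0 C 0
        (m, m 0 C)
      | j + 1 =>
        if C = 0 then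
          let m := pvUpd memo (j + 1) C 0
          (m, m (j + 1) C)
        else
          let r1 := pvHelper array j C memo
          let leave := r1.2
          -- array[i-1]: in range at every call reached from the top call (i ≤ len array)
          let x := PySem.List.pyGetD array (j : Int) 0
          let r2 := if x ≤ C then
              let r := pvHelper array j (C - x) r1.1
              (r.1, r.2 + x)
            else (r1.1, (0 : Int))
          let m3 := pvUpd r2.1 (j + 1) C (max leave r2.2)
          (m3, m3 (j + 1) C)

def findSubset2 (array : List Int) (C : Int) : Int :=
  (pvHelper array array.length C (fun _ _ => -1)).2

-- ===== PORT B =====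
-- dp[c] = max(dp[c], dp[c-x]+x); both indices are in range on every iteration inside Pre_
def pvStep (x : Int) (dp : List Int) (c : Int) : List Int :=
  dp.set c.toNat (max (PySem.List.pyGetD dp c 0) (PySem.List.pyGetD dp (c - x) 0 + x))

def findSubset2_alt (array : List Int) (C : Int) : Int :=
  let dp0 : List Int := List.replicate (C + 1).toNat 0
  let dp := array.foldl (fun dp x =>
    if 0 ≤ x ∧ x ≤ C then (PySem.List.pyRange C (x - 1) (-1)).foldl (pvStep x) dp
    else dp) dp0
  -- dp[C]: in range since 0 ≤ C inside Pre_
  PySem.List.pyGetD dp C 0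

-- ===== PRECONDITION & SPEC =====
-- Pre_ excludes exactly the inputs on which A raises IndexError: C < 0 (empty memo rows),
-- and C ≥ 1 together with a negative element (the recursion indexes column C - x > C).
def Pre_findSubset2 (array : List Int) (C : Int) : Prop :=
  0 ≤ C ∧ (C = 0 ∨ ∀ x ∈ array, 0 ≤ x)
instance (array : List Int) (C : Int) : Decidable (Pre_findSubset2 array C) := by
  unfold Pre_findSubset2; infer_instance

def pvWitness_findSubset2 : List Int × Int := ([3, 1, 4, 2], 7)

def Spec_findSubset2 (array : List Int) (C : Int) (out : Int) : Prop := out = findSubset2_alt array C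
instance (array : List Int) (C : Int) (out : Int) : Decidable (Spec_findSubset2 array C out) := by unfold Spec_findSubset2; infer_instance

-- ===== CLAIM (what is proved, stated in full; the proofs are below) =====
def Claim_equal_findSubset2 : Prop := ∀ (array : List Int) (C : Int), Dom_findSubset2 array C → Pre_findSubset2 array C → Spec_findSubset2 array C (findSubset2 array C)

-- ===== LEMMAS AND PROOFS =====

-- the common functional specification: best subset sum ≤ c over the list (head = last item considered)
def bestOf : List Int → Int → Int
  | [], _ => 0
  | x :: rest, c => if c = 0 then 0 else max (bestOf rest c) (if x ≤ c then bestOf rest (c - x) + x else 0)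

theorem bestOf_zero (l : List Int) : bestOf l 0 = 0 := by
  cases l <;> simp [bestOf]

theorem bestOf_nonneg (l : List Int) (c : Int) : 0 ≤ bestOf l c := by
  induction l generalizing c with
  | nil => simp [bestOf]
  | cons x rest ih =>
    simp only [bestOf]
    split_ifs with h1 h2
    · exact le_refl 0
    · exact le_max_of_le_left (ih c)
    · exact le_max_of_le_left (ih c)

-- skipped / unusable item does not change bestOf below its weight
theorem bestOf_cons_of_lt (x : Int) (rp : List Int) (c : Int) (h : c < x) :
    bestOf (x :: rp) c = bestOf rp c := by
  by_cases hc : c = 0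
  · simp [hc, bestOf, bestOf_zero]
  · simp only [bestOf, if_neg hc, if_neg (by omega : ¬ x ≤ c)]
    exact max_eq_left (bestOf_nonneg _ _)

def ValidMemo (array : List Int) (m : Nat → Int → Int) : Prop :=
  ∀ i c, m i c ≠ -1 → m i c = bestOf ((array.take i).reverse) c

theorem pvUpd_self (m : Nat → Int → Int) (i : Nat) (c v : Int) : pvUpd m i c v i c = v := by
  simp [pvUpd]

theorem valid_upd (array : List Int) (i : Nat) (c v : Int) (m : Nat → Int → Int)
    (hm : ValidMemo array m) (hv : v = bestOf ((array.take i).reverse) c) :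
    ValidMemo array (pvUpd m i c v) := by
  intro i' c' h'
  by_cases he : i' = i ∧ c' = c
  · obtain ⟨he1, he2⟩ := he
    subst he1; subst he2
    simpa [pvUpd] using hv
  · have heq : pvUpd m i c v i' c' = m i' c' := by simp [pvUpd, he]
    rw [heq] at h' ⊢
    exact hm i' c' h'

theorem helper_correct (array : List Int) :
    ∀ (i : Nat), i ≤ array.length → ∀ (C : Int) (m : Nat → Int → Int), ValidMemo array m →
      ValidMemo array (pvHelper array i C m).1 ∧
      (pvHelper array i C m).2 = bestOf ((array.take i).reverse) C := by
  intro i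
  induction i with
  | zero =>
    intro _ C m hm
    by_cases hhit : m 0 C ≠ -1
    · simp only [pvHelper, if_pos hhit]
      exact ⟨hm, by simpa [bestOf] using hm 0 C hhit⟩
    · simp only [pvHelper, if_neg hhit]
      refine ⟨valid_upd array 0 C 0 m hm (by simp [bestOf]), ?_⟩
      simp [pvUpd_self, bestOf]
  | succ j ih =>
    intro hlen C m hm
    have hj : j < array.length := by omega
    have hx : PySem.List.pyGetD array (j : Int) 0 = array[j] := by
      simpa using PySem.List.pyGetD_eq_getElem array (i := (j : Int)) 0 (by positivity) (by exact_mod_cast hj)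
    have htake : (array.take (j + 1)).reverse = array[j] :: (array.take j).reverse := by
      rw [List.take_add_one]
      simp [List.getElem?_eq_getElem hj]
    by_cases hhit : m (j + 1) C ≠ -1
    · simp only [pvHelper, if_pos hhit]
      exact ⟨hm, hm (j + 1) C hhit⟩
    · by_cases hC : C = 0
      · subst hC
        simp only [pvHelper, if_neg hhit, if_true]
        refine ⟨valid_upd array (j + 1) 0 0 m hm (by rw [htake, bestOf_zero]), ?_⟩
        rw [pvUpd_self, htake, bestOf_zero]
      · obtain ⟨hv1, he1⟩ := ih (by omega) C m hm
        have hbest : bestOf ((array.take (j + 1)).reverse) C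
            = max (bestOf ((array.take j).reverse) C)
                  (if array[j] ≤ C then bestOf ((array.take j).reverse) (C - array[j]) + array[j] else 0) := by
          rw [htake]; simp [bestOf, hC]
        by_cases hxc : array[j] ≤ C
        · obtain ⟨hv2, he2⟩ := ih (by omega) (C - array[j]) (pvHelper array j C m).1 hv1
          simp only [pvHelper, if_neg hhit, if_neg hC, hx, if_pos hxc]
          refine ⟨valid_upd array (j + 1) C _ _ hv2 ?_, ?_⟩
          · rw [hbest, he1, he2, if_pos hxc]
          · rw [pvUpd_self, hbest, he1, he2, if_pos hxc]
        · simp only [pvHelper, if_neg hhit, if_neg hC, hx, if_neg hxc]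
          refine ⟨valid_upd array (j + 1) C _ _ hv1 ?_, ?_⟩
          · rw [hbest, he1, if_neg hxc]
          · rw [pvUpd_self, hbest, he1, if_neg hxc]

theorem findSubset2_eq_bestOf (array : List Int) (C : Int) :
    findSubset2 array C = bestOf array.reverse C := by
  have h := helper_correct array array.length (le_refl _) C (fun _ _ => -1)
    (by intro i c hc; simp at hc)
  simpa [findSubset2, List.take_length] using h.2

-- descending inner loop: updates dp on indices t, t-1, …, x from old-row reads
theorem bestOf_cons_of_le (x : Int) (rp : List Int) (t : Int) (hx0 : 0 ≤ x) (hxt : x ≤ t) :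
    bestOf (x :: rp) t = max (bestOf rp t) (bestOf rp (t - x) + x) := by
  by_cases ht : t = 0
  · have hx : x = 0 := by omega
    subst ht; subst hx
    simp [bestOf, bestOf_zero]
  · simp [bestOf, ht, if_pos hxt]

theorem pyGetD_set_self (dp : List Int) (t v : Int) (h0 : 0 ≤ t) (h : t < (dp.length : Int)) :
    PySem.List.pyGetD (dp.set t.toNat v) t 0 = v := by
  rw [PySem.List.pyGetD_eq_getElem _ 0 h0 (by simpa using h)]
  exact List.getElem_set_self _

theorem pyGetD_set_other (dp : List Int) (t c v : Int) (hc0 : 0 ≤ c) (hc : c < (dp.length : Int))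
    (ht0 : 0 ≤ t) (hne : t ≠ c) :
    PySem.List.pyGetD (dp.set t.toNat v) c 0 = PySem.List.pyGetD dp c 0 := by
  rw [PySem.List.pyGetD_eq_getElem _ 0 hc0 (by simpa using hc),
      PySem.List.pyGetD_eq_getElem dp 0 hc0 hc]
  exact List.getElem_set_ne (by omega) _

theorem inner_loop_correct (x C : Int) (hx0 : 0 ≤ x) (hxC : x ≤ C) (rp : List Int) :
    ∀ (n : Nat) (t : Int), t = x - 1 + n → t ≤ C →
      ∀ dp : List Int, dp.length = (C + 1).toNat →
      (∀ c : Int, 0 ≤ c → c ≤ t → PySem.List.pyGetD dp c 0 = bestOf rp c) →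
      (∀ c : Int, t < c → c ≤ C → PySem.List.pyGetD dp c 0 = bestOf (x :: rp) c) →
      ((PySem.List.pyRange t (x - 1) (-1)).foldl (pvStep x) dp).length = (C + 1).toNat ∧
      ∀ c : Int, 0 ≤ c → c ≤ C →
        PySem.List.pyGetD ((PySem.List.pyRange t (x - 1) (-1)).foldl (pvStep x) dp) c 0
          = bestOf (x :: rp) c := by
  intro n
  induction n with
  | zero =>
    intro t ht htC dp hlen h1 h2
    rw [PySem.List.pyRange_neg_one_eq_nil (by omega)]
    simp only [List.foldl_nil]
    refine ⟨hlen, fun c hc0 hcC => ?_⟩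
    by_cases hct : c ≤ t
    · rw [bestOf_cons_of_lt x rp c (by omega)]
      exact h1 c hc0 hct
    · exact h2 c (by omega) hcC
  | succ m ihm =>
    intro t ht htC dp hlen h1 h2
    have ht0 : 0 ≤ t := by omega
    have hlenInt : (dp.length : Int) = C + 1 := by omega
    rw [PySem.List.pyRange_neg_one_cons (by omega : x - 1 < t)]
    simp only [List.foldl_cons]
    have hval : pvStep x dp t = dp.set t.toNat (bestOf (x :: rp) t) := by
      unfold pvStep
      rw [h1 t ht0 le_rfl, h1 (t - x) (by omega) (by omega),
        bestOf_cons_of_le x rp t hx0 (by omega)]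
    rw [hval]
    have hres := ihm (t - 1) (by omega) (by omega) (dp.set t.toNat (bestOf (x :: rp) t))
      (by simpa using hlen)
      (fun c hc0 hct => by
        rw [pyGetD_set_other dp t c _ hc0 (by omega) ht0 (by omega)]
        exact h1 c hc0 (by omega))
      (fun c hct hcC => by
        by_cases hceq : c = t
        · subst hceq
          exact pyGetD_set_self dp c _ (by omega) (by omega)
        · rw [pyGetD_set_other dp t c _ (by omega) (by omega) ht0 (by omega)]
          exact h2 c (by omega) hcC)
    exact hres

theorem outer_fold_correct (C : Int) (_hC : 0 ≤ C) :
    ∀ (l : List Int), (∀ x ∈ l, 0 ≤ x) → ∀ (rp : List Int) (dp : List Int),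
      dp.length = (C + 1).toNat →
      (∀ c : Int, 0 ≤ c → c ≤ C → PySem.List.pyGetD dp c 0 = bestOf rp c) →
      (l.foldl (fun dp x =>
        if 0 ≤ x ∧ x ≤ C then (PySem.List.pyRange C (x - 1) (-1)).foldl (pvStep x) dp
        else dp) dp).length = (C + 1).toNat ∧
      ∀ c : Int, 0 ≤ c → c ≤ C →
        PySem.List.pyGetD (l.foldl (fun dp x =>
          if 0 ≤ x ∧ x ≤ C then (PySem.List.pyRange C (x - 1) (-1)).foldl (pvStep x) dp
          else dp) dp) c 0 = bestOf (l.reverse ++ rp) c := by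
  intro l
  induction l with
  | nil =>
    intro _ rp dp hlen h1
    exact ⟨hlen, by simpa using h1⟩
  | cons y tl ihl =>
    intro hnn rp dp hlen h1
    have hy : 0 ≤ y := hnn y List.mem_cons_self
    have hrev : (y :: tl).reverse ++ rp = tl.reverse ++ (y :: rp) := by simp
    simp only [List.foldl_cons]
    by_cases hyC : y ≤ C
    · rw [if_pos ⟨hy, hyC⟩]
      obtain ⟨hL1, hP1⟩ := inner_loop_correct y C hy hyC rp (C - y + 1).toNat C
        (by omega) le_rfl dp hlen h1
        (fun c hc hc' => absurd (lt_of_lt_of_le hc hc') (lt_irrefl C))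
      obtain ⟨hL2, hP2⟩ := ihl (fun z hz => hnn z (List.mem_cons_of_mem _ hz)) (y :: rp) _ hL1 hP1
      exact ⟨hL2, fun c hc0 hcC => by rw [hP2 c hc0 hcC, hrev]⟩
    · rw [if_neg (fun h => hyC h.2)]
      obtain ⟨hL2, hP2⟩ := ihl (fun z hz => hnn z (List.mem_cons_of_mem _ hz)) (y :: rp) dp hlen
        (fun c hc0 hcC => by
          rw [bestOf_cons_of_lt y rp c (by omega)]
          exact h1 c hc0 hcC)
      exact ⟨hL2, fun c hc0 hcC => by rw [hP2 c hc0 hcC, hrev]⟩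

theorem alt_eq_bestOf (array : List Int) (C : Int) (hC : 0 ≤ C)
    (h : ∀ x ∈ array, 0 ≤ x) : findSubset2_alt array C = bestOf array.reverse C := by
  unfold findSubset2_alt
  obtain ⟨hL, hP⟩ := outer_fold_correct C hC array h [] (List.replicate (C + 1).toNat 0)
    (List.length_replicate)
    (fun c hc0 hcC => by
      rw [PySem.List.pyGetD_eq_getElem _ 0 hc0 (by simp; omega), List.getElem_replicate]
      cases array.reverse <;> rfl)
  have := hP C hC le_rfl
  simpa using this

theorem fold_zero_aux : ∀ (l : List Int),
    l.foldl (fun dp x =>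
      if 0 ≤ x ∧ x ≤ (0 : Int) then (PySem.List.pyRange 0 (x - 1) (-1)).foldl (pvStep x) dp
      else dp) [(0 : Int)] = [(0 : Int)] := by
  intro l
  induction l with
  | nil => rfl
  | cons y tl ih =>
    simp only [List.foldl_cons]
    by_cases hy : 0 ≤ y ∧ y ≤ (0 : Int)
    · have hy0 : y = 0 := by omega
      subst hy0
      rw [if_pos hy]
      have : (PySem.List.pyRange 0 (0 - 1 : Int) (-1)).foldl (pvStep 0) [(0 : Int)] = [(0 : Int)] := by decide
      rw [this]
      exact ih
    · rw [if_neg hy]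
      exact ih

theorem alt_zero (array : List Int) : findSubset2_alt array 0 = 0 := by
  show PySem.List.pyGetD (array.foldl (fun dp x =>
      if 0 ≤ x ∧ x ≤ (0 : Int) then (PySem.List.pyRange 0 (x - 1) (-1)).foldl (pvStep x) dp
      else dp) (List.replicate ((0 : Int) + 1).toNat 0)) 0 0 = 0
  have h1 : List.replicate ((0 : Int) + 1).toNat (0 : Int) = [(0 : Int)] := rfl
  rw [h1, fold_zero_aux array]
  rfl

-- ===== VERDICT (by name: the statement is the Claim_ definition above) =====
theorem findSubset2_spec : Claim_equal_findSubset2 := by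
  intro array C _ hpre
  unfold Spec_findSubset2
  obtain ⟨hC, hcase⟩ := hpre
  rcases hcase with h0 | hnn
  · subst h0
    rw [alt_zero, findSubset2_eq_bestOf, bestOf_zero]
  · rw [findSubset2_eq_bestOf, alt_eq_bestOf array C hC hnn]
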